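-- pv_equiv track=rewrite | github.com/posl/comment_recommendation | script/split_gen/2_time/zh/186_B/2.py | solve
-- ===== SOURCE A (Python) =====
-- def solve(H, W, A):
--     min = 1000
--     for i in range(H):
--         for j in range(W):
--             if A[i][j] < min:
--                 min = A[i][j]
--     res = 0
--     for i in range(H):
--         for j in range(W):
--             res += A[i][j] - min
--     return res
-- ===== SOURCE B (Python) =====
-- def solve(H, W, A):
--     total = 0
--     mn = 1000
--     count = 0
--     for i in range(H):
--         for j in range(W):
--             v = A[i][j]
--             total += v
--             if v < mn:
--                 mn = v
--             count += 1
--     return total - mn * count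
-- ===== Notes on version B (the rewrite author's own statement) =====
-- stated objective: simpler
-- what changed: Single pass that accumulates sum, running minimum (same 1000 initialization as A) and element count, replacing A's second nested loop with the closed form total - mn*count.
import Mathlib
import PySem

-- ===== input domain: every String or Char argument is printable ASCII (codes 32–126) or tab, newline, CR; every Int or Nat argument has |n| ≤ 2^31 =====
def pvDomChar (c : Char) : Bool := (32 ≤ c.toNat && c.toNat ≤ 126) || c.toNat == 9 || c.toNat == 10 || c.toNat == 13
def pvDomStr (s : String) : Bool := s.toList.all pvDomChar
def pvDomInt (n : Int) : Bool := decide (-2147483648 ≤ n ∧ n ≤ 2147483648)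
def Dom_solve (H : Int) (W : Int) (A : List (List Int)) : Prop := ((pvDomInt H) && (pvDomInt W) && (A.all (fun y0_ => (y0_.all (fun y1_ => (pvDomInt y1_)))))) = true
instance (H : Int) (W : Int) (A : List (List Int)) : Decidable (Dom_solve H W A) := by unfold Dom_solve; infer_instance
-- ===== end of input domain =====

-- B replaces A's second nested loop with a single pass accumulating sum/min/count and the closed form total - mn*count (objective: simpler).


-- ===== PORT A =====
-- two nested double loops: first the minimum (initialized to 1000), then the sum of differences.
-- A[i][j] is ported as pyGetD with defaults; Pre_solve guarantees every access is in range.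
def solve (H : Int) (W : Int) (A : List (List Int)) : Int :=
  let min :=
    (PySem.List.pyRange 0 H 1).foldl (fun m i =>
      (PySem.List.pyRange 0 W 1).foldl (fun m j =>
        if PySem.List.pyGetD (PySem.List.pyGetD A i []) j 0 < m then
          PySem.List.pyGetD (PySem.List.pyGetD A i []) j 0
        else m) m) 1000
  (PySem.List.pyRange 0 H 1).foldl (fun r i =>
    (PySem.List.pyRange 0 W 1).foldl (fun r j =>
      r + (PySem.List.pyGetD (PySem.List.pyGetD A i []) j 0 - min)) r) 0

-- ===== PORT B =====
-- single pass over the grid carrying (total, mn, count); closed-form result.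
def solve_alt (H : Int) (W : Int) (A : List (List Int)) : Int :=
  let s :=
    (PySem.List.pyRange 0 H 1).foldl (fun s i =>
      (PySem.List.pyRange 0 W 1).foldl (fun s j =>
        let v := PySem.List.pyGetD (PySem.List.pyGetD A i []) j 0
        (s.1 + v, (if v < s.2.1 then v else s.2.1), s.2.2 + 1)) s)
      ((0 : Int), (1000 : Int), (0 : Int))
  s.1 - s.2.1 * s.2.2

-- ===== PRECONDITION & SPEC =====
-- Pre_ excludes exactly the inputs on which Python A raises IndexError: some visited index i < H
-- beyond A's length, or some visited row shorter than W.
def Pre_solve (H : Int) (W : Int) (A : List (List Int)) : Prop :=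
  H ≤ 0 ∨ W ≤ 0 ∨ (H ≤ (A.length : Int) ∧ ∀ row ∈ A.take H.toNat, W ≤ (row.length : Int))
instance (H : Int) (W : Int) (A : List (List Int)) : Decidable (Pre_solve H W A) := by
  unfold Pre_solve; infer_instance
def pvWitness_solve : Int × Int × List (List Int) := (2, 2, [[1, 2], [3, 4]])

def Spec_solve (H : Int) (W : Int) (A : List (List Int)) (out : Int) : Prop := out = solve_alt H W A
instance (H : Int) (W : Int) (A : List (List Int)) (out : Int) : Decidable (Spec_solve H W A out) := by unfold Spec_solve; infer_instance

-- ===== CLAIM (what is proved, stated in full; the proofs are below) =====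
def Claim_equal_solve : Prop := ∀ (H : Int) (W : Int) (A : List (List Int)), Dom_solve H W A → Pre_solve H W A → Spec_solve H W A (solve H W A)

-- ===== LEMMAS AND PROOFS =====

-- the flattened sequence of grid accesses both ports traverse
def pvVals (H : Int) (W : Int) (A : List (List Int)) : List Int :=
  (PySem.List.pyRange 0 H 1).flatMap (fun i =>
    (PySem.List.pyRange 0 W 1).map (fun j => PySem.List.pyGetD (PySem.List.pyGetD A i []) j 0))

theorem pv_min_flat (H W : Int) (A : List (List Int)) (m0 : Int) :
    (PySem.List.pyRange 0 H 1).foldl (fun m i =>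
      (PySem.List.pyRange 0 W 1).foldl (fun m j =>
        if PySem.List.pyGetD (PySem.List.pyGetD A i []) j 0 < m then
          PySem.List.pyGetD (PySem.List.pyGetD A i []) j 0
        else m) m) m0
    = (pvVals H W A).foldl (fun m v => if v < m then v else m) m0 := by
  simp [pvVals, List.foldl_flatMap, List.foldl_map]

theorem pv_res_flat (H W : Int) (A : List (List Int)) (m r0 : Int) :
    (PySem.List.pyRange 0 H 1).foldl (fun r i =>
      (PySem.List.pyRange 0 W 1).foldl (fun r j =>
        r + (PySem.List.pyGetD (PySem.List.pyGetD A i []) j 0 - m)) r) r0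
    = (pvVals H W A).foldl (fun r v => r + (v - m)) r0 := by
  simp [pvVals, List.foldl_flatMap, List.foldl_map]

theorem pv_sumsub (vs : List Int) (m : Int) : ∀ r0 : Int,
    vs.foldl (fun r v => r + (v - m)) r0 = r0 + vs.sum - m * vs.length := by
  induction vs with
  | nil => intro r0; simp
  | cons v vs ih =>
      intro r0
      simp only [List.foldl_cons, List.sum_cons, List.length_cons, ih]
      push_cast
      ring

theorem pv_triple (vs : List Int) : ∀ (t mn c : Int),
    vs.foldl (fun s v => (s.1 + v, (if v < s.2.1 then v else s.2.1), s.2.2 + 1)) (t, mn, c)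
    = (t + vs.sum, vs.foldl (fun m v => if v < m then v else m) mn, c + vs.length) := by
  induction vs with
  | nil => intro t mn c; simp
  | cons v vs ih =>
      intro t mn c
      simp only [List.foldl_cons, List.sum_cons, List.length_cons, ih]
      refine Prod.ext (by push_cast; ring) (Prod.ext rfl ?_)
      push_cast; ring

theorem pv_alt_flat (H W : Int) (A : List (List Int)) :
    solve_alt H W A =
      (pvVals H W A).sum
        - ((pvVals H W A).foldl (fun m v => if v < m then v else m) 1000)
          * (pvVals H W A).length := by
  unfold solve_alt
  have h : (PySem.List.pyRange 0 H 1).foldl (fun s i =>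
      (PySem.List.pyRange 0 W 1).foldl (fun s j =>
        let v := PySem.List.pyGetD (PySem.List.pyGetD A i []) j 0
        (s.1 + v, (if v < s.2.1 then v else s.2.1), s.2.2 + 1)) s)
      ((0 : Int), (1000 : Int), (0 : Int))
    = (pvVals H W A).foldl
        (fun s v => (s.1 + v, (if v < s.2.1 then v else s.2.1), s.2.2 + 1))
        ((0 : Int), (1000 : Int), (0 : Int)) := by
    simp [pvVals, List.foldl_flatMap, List.foldl_map]
  rw [h, pv_triple]
  simp

-- ===== VERDICT (by name: the statement is the Claim_ definition above) =====
theorem solve_spec : Claim_equal_solve := by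
  intro H W A _ _
  unfold Spec_solve
  unfold solve
  rw [pv_min_flat, pv_res_flat, pv_sumsub, pv_alt_flat]
  ring
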